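-- pv_equiv track=rewrite | github.com/softcom-su/CLDT | bundles/su.softcom.cldt.core/resources/su/softcom/cldt/core/operations/obfuscation/komdiv/obfuscation/p2pd.py | syn2
-- ===== SOURCE A (Python) =====
-- import os, sys, copy, json, re, time, random
--
-- calls = ["bal", "bgezal", "bgezall", "bltzal", "bltzall", "jal", "jalr", "jalr.hb"]
--
-- SC = ['add', 'addi', 'addiu', 'addu', 'and', 'andi', 'cfc1', 'cfc2', 'clo', 'clz', 'dadd', 'daddi', 'daddiu', 'daddu',
-- 	  'dclo', \
-- 	  'dclz', 'dmfc0', 'dmfc1', 'dmfc2', 'dneg', 'dnegu', 'drotr', 'drotr32', 'drotrv', 'dsbh', 'dshd', 'dsll',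
-- 	  'dsll32', 'dsllv', \
-- 	  'dsra', 'dsra32', 'dsrav', 'dsrl', 'dsrl32', 'dsrlv', 'dsub', 'dsubu', 'lb', 'lbu', 'ld', 'ldl', 'ldr', 'lh',
-- 	  'lhu', 'lui', \
-- 	  'lw', 'lwl', 'lwr', 'lwu', 'mfc0', 'mfc1', 'mfc2', 'mfhc1', 'mfhc2', 'mfhi', 'mflo', 'move', 'movf', 'movn',
-- 	  'movt', 'movz', \
-- 	  'mul', 'neg', 'negu', 'nor', 'not', 'or', 'ori', 'rotr', 'rotrv', 'sll', 'sllv', 'slt', 'slti', 'sltiu', 'sltu',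
-- 	  'sra', \
-- 	  'srav', 'srl', 'srlv', 'sub', 'subu', 'xor', 'xori']
--
-- RX = ["$sp", "$fp", "$at", "$k0", "$k1", "$zero", "$gp", "$ra", "$hi", "$lo"]
--
-- def syn2(lu):
-- 	l1 = [];
-- 	l3 = [];
-- 	l4 = []
-- 	for line in lu:
-- 		l1.append([])
-- 		if len(line) > 1 and line[0] in SC and line[1] not in " ".join(line[2:]) and line[1] not in RX: l1[-1].append(
-- 			line[1])  # не используем регистры из RX
-- 	l2 = copy.deepcopy(l1)
-- 	for i in range(len(l1) - 1, -1, -1):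
-- 		if len(l1[i]):
-- 			for j in range(i - 1, -1, -1):
-- 				#				if l1[i][0] not in " ".join(lu[j]):
-- 				if l1[i][0] not in " ".join(lu[j]) and lu[j][
-- 					0] not in calls:  # [calls] сбрасывает список, ### (!) надо поднять свободный регистр из слота (!) ###
-- 					if l1[i][0] not in l2[j]: l2[j].append(l1[i][0])
-- 				else:
-- 					break
-- 	for i in range(len(l1)):
-- 		if len(l2[i]):
-- 			l2[i].sort()
-- 			if (i and lu[i - 1][0] not in calls) or not i:
-- 				#				l4.append(["free-" + str(len(l2[i]))] + l2[i])	# команда в слоте - без точки внедрения !!!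
-- 				l4.append(l2[i])  # команда в слоте - без точки внедрения !!!
-- 			else:
-- 				l4.append([])
-- 		else:
-- 			l4.append([])
-- 		l3.append(lu[i])
-- 	return l3, l4
-- ===== SOURCE B (Python) =====
-- import copy
--
-- calls = ["bal", "bgezal", "bgezall", "bltzal", "bltzall", "jal", "jalr", "jalr.hb"]
--
-- SC = ['add', 'addi', 'addiu', 'addu', 'and', 'andi', 'cfc1', 'cfc2', 'clo', 'clz', 'dadd', 'daddi', 'daddiu', 'daddu',
-- 	  'dclo', \
-- 	  'dclz', 'dmfc0', 'dmfc1', 'dmfc2', 'dneg', 'dnegu', 'drotr', 'drotr32', 'drotrv', 'dsbh', 'dshd', 'dsll',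
-- 	  'dsll32', 'dsllv', \
-- 	  'dsra', 'dsra32', 'dsrav', 'dsrl', 'dsrl32', 'dsrlv', 'dsub', 'dsubu', 'lb', 'lbu', 'ld', 'ldl', 'ldr', 'lh',
-- 	  'lhu', 'lui', \
-- 	  'lw', 'lwl', 'lwr', 'lwu', 'mfc0', 'mfc1', 'mfc2', 'mfhc1', 'mfhc2', 'mfhi', 'mflo', 'move', 'movf', 'movn',
-- 	  'movt', 'movz', \
-- 	  'mul', 'neg', 'negu', 'nor', 'not', 'or', 'ori', 'rotr', 'rotrv', 'sll', 'sllv', 'slt', 'slti', 'sltiu', 'sltu',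
-- 	  'sra', \
-- 	  'srav', 'srl', 'srlv', 'sub', 'subu', 'xor', 'xori']
--
-- RX = ["$sp", "$fp", "$at", "$k0", "$k1", "$zero", "$gp", "$ra", "$hi", "$lo"]
--
--
-- def syn2(lu):
-- 	# phase 1: the register a line frees (at most one per line)
-- 	l1 = [[line[1]] if (len(line) > 1 and line[0] in SC
-- 						and line[1] not in " ".join(line[2:])
-- 						and line[1] not in RX) else []
-- 		  for line in lu]
-- 	l2 = [list(x) for x in l1]
-- 	# phase 2: one backward sweep with a live list S of still-propagating registers
-- 	S = []
-- 	for j in range(len(lu) - 1, -1, -1):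
-- 		if lu[j][0] in calls:
-- 			S = []
-- 		else:
-- 			joined = " ".join(lu[j])
-- 			S = [r for r in S if r not in joined]
-- 		for r in S:
-- 			if r not in l2[j]:
-- 				l2[j].append(r)
-- 		S = S + l1[j]
-- 	# phase 3: sort and keep only slots not preceded by a call
-- 	l4 = [sorted(l2[i]) if l2[i] and (i == 0 or lu[i - 1][0] not in calls) else []
-- 		  for i in range(len(lu))]
-- 	return list(lu), l4
-- ===== Notes on version B (the rewrite author's own statement) =====
-- stated objective: alternative
-- what changed: Replaces A's nested backward propagation (for each defining line, walk downward until blocked) by a single backward sweep maintaining a live list of still-propagating registers, joining each line once; phase 1 and 3 become comprehensions.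
-- outside the precondition, e.g. on syn2([[]]): A returns ([[]], [[]]), B raises IndexError
import Mathlib
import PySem

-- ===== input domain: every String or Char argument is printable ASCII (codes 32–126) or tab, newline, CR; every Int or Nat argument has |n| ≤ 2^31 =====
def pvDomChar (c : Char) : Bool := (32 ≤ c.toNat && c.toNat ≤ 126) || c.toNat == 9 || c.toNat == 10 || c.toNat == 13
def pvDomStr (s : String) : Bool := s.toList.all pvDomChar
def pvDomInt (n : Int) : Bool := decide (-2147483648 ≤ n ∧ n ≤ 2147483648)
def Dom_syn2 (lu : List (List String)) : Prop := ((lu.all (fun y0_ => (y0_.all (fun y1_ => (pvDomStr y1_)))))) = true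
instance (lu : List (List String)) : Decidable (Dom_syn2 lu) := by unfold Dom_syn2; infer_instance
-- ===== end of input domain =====

-- B replaces A's quadratic nested backward propagation by one backward sweep with a live
-- register list (objective: alternative decomposition, same results; equivalence is about
-- return values — A's returned l3 aliases the caller's inner lists, B's is a fresh copy).

-- module constants
def pvCalls : List String := ["bal", "bgezal", "bgezall", "bltzal", "bltzall", "jal", "jalr", "jalr.hb"]

def pvSC : List String := ["add", "addi", "addiu", "addu", "and", "andi", "cfc1", "cfc2", "clo", "clz", "dadd", "daddi", "daddiu", "daddu",
  "dclo", "dclz", "dmfc0", "dmfc1", "dmfc2", "dneg", "dnegu", "drotr", "drotr32", "drotrv", "dsbh", "dshd", "dsll",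
  "dsll32", "dsllv", "dsra", "dsra32", "dsrav", "dsrl", "dsrl32", "dsrlv", "dsub", "dsubu", "lb", "lbu", "ld", "ldl", "ldr", "lh",
  "lhu", "lui", "lw", "lwl", "lwr", "lwu", "mfc0", "mfc1", "mfc2", "mfhc1", "mfhc2", "mfhi", "mflo", "move", "movf", "movn",
  "movt", "movz", "mul", "neg", "negu", "nor", "not", "or", "ori", "rotr", "rotrv", "sll", "sllv", "slt", "slti", "sltiu", "sltu",
  "sra", "srav", "srl", "srlv", "sub", "subu", "xor", "xori"]

def pvRX : List String := ["$sp", "$fp", "$at", "$k0", "$k1", "$zero", "$gp", "$ra", "$hi", "$lo"]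

-- ===== PORT A =====
-- A's inner loop: for j in range(i-1, -1, -1) with break; fuel t means next index is t-1
def innerA (lu : List (List String)) (r : String) : List (List String) → Nat → List (List String)
  | l2, 0 => l2
  | l2, t+1 =>
    if !(PySem.Str.isIn r (PySem.Str.join " " (lu.getD t []))) && !(pvCalls.contains ((lu.getD t []).getD 0 "")) then
      innerA lu r (l2.set t (if (l2.getD t []).contains r then l2.getD t [] else l2.getD t [] ++ [r])) t
    else l2

-- A's outer loop: for i in range(len(l1)-1, -1, -1); fuel m means next index is m-1
def outerA (lu : List (List String)) (l1 : List (List String)) : List (List String) → Nat → List (List String)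
  | l2, 0 => l2
  | l2, m+1 =>
    outerA lu l1 (if (l1.getD m []).length != 0 then innerA lu ((l1.getD m []).getD 0 "") l2 m else l2) m

def syn2 (lu : List (List String)) : List (List String) × List (List String) :=
  let l1 := lu.foldl (fun acc line =>
    let cur : List String := []
    let cur := if (decide (1 < line.length) && pvSC.contains (line.getD 0 "")
        && !(PySem.Str.isIn (line.getD 1 "") (PySem.Str.join " " (line.drop 2)))
        && !(pvRX.contains (line.getD 1 ""))) then cur ++ [line.getD 1 ""] else cur
    acc ++ [cur]) []
  let l2 := outerA lu l1 l1 l1.length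
  (List.range l1.length).foldl (fun (p : List (List String) × List (List String)) i =>
    let v := if (l2.getD i []).length != 0 then
        (let s := PySem.List.sorted (l2.getD i []) (fun x => x) false
         if (decide (i ≠ 0) && !(pvCalls.contains ((lu.getD (i-1) []).getD 0 ""))) || decide (i = 0) then s else [])
      else []
    (p.1 ++ [lu.getD i []], p.2 ++ [v])) ([], [])

-- ===== PORT B =====
-- B's single backward sweep with live list S; fuel t means next index is t-1
def sweepB (lu : List (List String)) (l1 : List (List String)) : List (List String) → List String → Nat → List (List String)
  | l2, _, 0 => l2
  | l2, S, t+1 =>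
    let S1 := if pvCalls.contains ((lu.getD t []).getD 0 "") then []
              else S.filter (fun r => !(PySem.Str.isIn r (PySem.Str.join " " (lu.getD t []))))
    sweepB lu l1 (l2.set t (S1.foldl (fun acc r => if acc.contains r then acc else acc ++ [r]) (l2.getD t []))) (S1 ++ l1.getD t []) t

def syn2_alt (lu : List (List String)) : List (List String) × List (List String) :=
  let l1 := lu.map (fun line => if (decide (1 < line.length) && pvSC.contains (line.getD 0 "")
      && !(PySem.Str.isIn (line.getD 1 "") (PySem.Str.join " " (line.drop 2)))
      && !(pvRX.contains (line.getD 1 ""))) then [line.getD 1 ""] else [])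
  let l2 := sweepB lu l1 (l1.map (fun x => x)) [] lu.length
  let l4 := (List.range lu.length).map (fun i =>
    if ((l2.getD i []).length != 0) && (decide (i = 0) || !(pvCalls.contains ((lu.getD (i-1) []).getD 0 ""))) then
      PySem.List.sorted (l2.getD i []) (fun x => x) false else [])
  (lu.map (fun x => x), l4)

-- ===== PRECONDITION & SPEC =====
-- Pre_ excludes inputs containing an empty instruction line: on those A raises IndexError on
-- lu[j][0] whenever an empty line is actually inspected, and returns only when it never is
-- (e.g. [[]]); B's single sweep inspects every line's opcode and raises there.
def Pre_syn2 (lu : List (List String)) : Prop := ∀ line ∈ lu, line ≠ []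
instance (lu : List (List String)) : Decidable (Pre_syn2 lu) := by unfold Pre_syn2; infer_instance

def pvWitness_syn2 : List (List String) := [["move", "$t0", "$t1"], ["addu", "$t2", "$t0", "$t1"]]

def Spec_syn2 (lu : List (List String)) (out : List (List String) × List (List String)) : Prop := out = syn2_alt lu
instance (lu : List (List String)) (out : List (List String) × List (List String)) : Decidable (Spec_syn2 lu out) := by unfold Spec_syn2; infer_instance

-- ===== CLAIM (what is proved, stated in full; the proofs are below) =====
def Claim_equal_syn2 : Prop := ∀ (lu : List (List String)), Dom_syn2 lu → Pre_syn2 lu → Spec_syn2 lu (syn2 lu)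

-- ===== LEMMAS AND PROOFS =====

-- the dedup-append both programs perform on l2[j]
def pvDed (acc : List String) (r : String) : List String := if acc.contains r then acc else acc ++ [r]

-- the blocking test both programs apply at line k
def pvCond (lu : List (List String)) (r : String) (k : Nat) : Bool :=
  !(PySem.Str.isIn r (PySem.Str.join " " (lu.getD k []))) && !(pvCalls.contains ((lu.getD k []).getD 0 ""))

-- pvCond holds at every k ∈ [j, i)
def pvAll (lu : List (List String)) (r : String) (j i : Nat) : Bool := (List.range' j (i - j)).all (fun k => pvCond lu r k)

-- contribution of source line i to target line j
def pvElem (lu : List (List String)) (l1 : List (List String)) (j i : Nat) : List String :=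
  match l1.getD i [] with
  | [] => []
  | r :: _ => if pvAll lu r j i then [r] else []

-- contributions to line j of sources i = n-1 down to lo (descending i order)
def pvDlist (lu : List (List String)) (l1 : List (List String)) (j lo : Nat) : List String :=
  if _h : lo < lu.length then pvDlist lu l1 j (lo+1) ++ pvElem lu l1 j lo else []
termination_by lu.length - lo

lemma pvDlist_stop (lu l1 : List (List String)) (j lo : Nat) (h : lu.length ≤ lo) : pvDlist lu l1 j lo = [] := by
  rw [pvDlist]; simp [Nat.not_lt.2 h]

lemma pvDlist_step (lu l1 : List (List String)) (j lo : Nat) (h : lo < lu.length) :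
    pvDlist lu l1 j lo = pvDlist lu l1 j (lo+1) ++ pvElem lu l1 j lo := by
  rw [pvDlist]; simp [h]

lemma pvAll_of_le (lu : List (List String)) (r : String) (j i : Nat) (h : i ≤ j) : pvAll lu r j i = true := by
  unfold pvAll
  simp [Nat.sub_eq_zero_of_le h]

lemma pvAll_succ_right (lu : List (List String)) (r : String) (j t : Nat) (h : j ≤ t) :
    pvAll lu r j (t+1) = (pvAll lu r j t && pvCond lu r t) := by
  unfold pvAll
  have h1 : t + 1 - j = (t - j) + 1 := by omega
  have h2 : j + (t - j) = t := by omega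
  rw [h1, List.range'_1_concat, List.all_append, h2]
  simp

lemma pvAll_cons_left (lu : List (List String)) (r : String) (m i : Nat) (h : m + 1 ≤ i) :
    pvAll lu r m i = (pvCond lu r m && pvAll lu r (m+1) i) := by
  unfold pvAll
  have h1 : i - m = (i - (m+1)) + 1 := by omega
  rw [h1, List.range'_succ]
  simp

lemma innerA_length (lu : List (List String)) (r : String) (l2 : List (List String)) (t : Nat) :
    (innerA lu r l2 t).length = l2.length := by
  induction t generalizing l2 with
  | zero => rfl
  | succ t ih =>
    simp only [innerA]
    split
    · rw [ih]; simp
    · rfl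

lemma innerA_getD (lu : List (List String)) (r : String) : ∀ (t : Nat) (l2 : List (List String)), t ≤ l2.length →
    ∀ j, (innerA lu r l2 t).getD j [] =
      (if j < t ∧ pvAll lu r j t = true then pvDed (l2.getD j []) r else l2.getD j []) := by
  intro t
  induction t with
  | zero => intro l2 ht j; simp [innerA]
  | succ t ih =>
    intro l2 ht j
    have htl : t < l2.length := by omega
    simp only [innerA]
    by_cases hc : (!(PySem.Str.isIn r (PySem.Str.join " " (lu.getD t []))) && !(pvCalls.contains ((lu.getD t []).getD 0 ""))) = true
    · have hct : pvCond lu r t = true := hc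
      rw [if_pos hc, ih _ (by rw [List.length_set]; omega)]
      rcases Nat.lt_trichotomy j t with hj | hj | hj
      · have hne : t ≠ j := by omega
        simp only [List.getD, List.getElem?_set_ne hne]
        rw [pvAll_succ_right lu r j t (Nat.le_of_lt hj), hct]
        simp [hj, Nat.lt_succ_of_lt hj]
      · subst hj
        rw [if_neg (by omega)]
        rw [pvAll_succ_right lu r j j le_rfl, pvAll_of_le lu r j j le_rfl, hct]
        simp only [List.getD, List.getElem?_set_self htl]
        simp [pvDed]
      · have hne : t ≠ j := by omega
        simp only [List.getD, List.getElem?_set_ne hne]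
        rw [if_neg (by omega), if_neg (by omega)]
    · rw [if_neg hc]
      by_cases hj : j < t + 1
      · have hcf : pvCond lu r t = false := by
          unfold pvCond
          exact Bool.eq_false_iff.mpr hc
        rw [if_neg ?_]
        rintro ⟨-, hall⟩
        rw [pvAll_succ_right lu r j t (by omega), hcf] at hall
        simp at hall
      · rw [if_neg (by omega)]

lemma outerA_length (lu l1 : List (List String)) : ∀ (t : Nat) (l2 : List (List String)),
    (outerA lu l1 l2 t).length = l2.length := by
  intro t
  induction t with
  | zero => intro l2; rfl
  | succ t ih =>
    intro l2
    simp only [outerA]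
    rw [ih]
    split
    · rw [innerA_length]
    · rfl

lemma outerA_getD (lu l1 : List (List String)) : ∀ (m : Nat) (l2 : List (List String)), m ≤ lu.length → l2.length = lu.length →
    (∀ j, j < lu.length → l2.getD j [] = (pvDlist lu l1 j (max m (j+1))).foldl pvDed (l1.getD j [])) →
    ∀ j, j < lu.length → (outerA lu l1 l2 m).getD j [] = (pvDlist lu l1 j (j+1)).foldl pvDed (l1.getD j []) := by
  intro m
  induction m with
  | zero =>
    intro l2 hm hl hinv j hj
    have := hinv j hj
    rwa [Nat.max_eq_right (by omega)] at this
  | succ m ih =>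
    intro l2 hm hl hinv j hj
    simp only [outerA]
    refine ih _ (by omega) ?_ ?_ j hj
    · split
      · rw [innerA_length]; exact hl
      · exact hl
    · intro j' hj'
      by_cases h1 : ((l1.getD m []).length != 0) = true
      · rw [if_pos h1]
        obtain ⟨r, rest, hr⟩ : ∃ r rest, l1.getD m [] = r :: rest := by
          cases hre : l1.getD m [] with
          | nil => rw [hre] at h1; simp at h1
          | cons r rest => exact ⟨r, rest, rfl⟩
        have hr0 : (l1.getD m []).getD 0 "" = r := by rw [hr]; rfl
        rw [hr0, innerA_getD lu r m l2 (by omega) j']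
        by_cases hjm : j' < m
        · -- target index below m
          have hmax1 : max m (j'+1) = m := by omega
          have hmax2 : max (m+1) (j'+1) = m+1 := by omega
          rw [hmax1, pvDlist_step lu l1 j' m (by omega)]
          have hinv' := hinv j' hj'
          rw [hmax2] at hinv'
          have helem : pvElem lu l1 j' m = if pvAll lu r j' m then [r] else [] := by
            unfold pvElem; rw [hr]
          by_cases hall : pvAll lu r j' m = true
          · rw [if_pos ⟨hjm, hall⟩, hinv', helem, if_pos hall, List.foldl_append]
            rfl
          · rw [if_neg (by tauto), hinv', helem, if_neg hall, List.append_nil]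
        · rw [if_neg (by tauto)]
          have hinv' := hinv j' hj'
          rw [Nat.max_eq_right (by omega)] at hinv'
          rw [hinv', Nat.max_eq_right (by omega)]
      · rw [if_neg h1]
        have hnil : l1.getD m [] = [] := by
          cases hre : l1.getD m [] with
          | nil => rfl
          | cons r rest => rw [hre] at h1; simp at h1
        have helem : pvElem lu l1 j' m = [] := by
          unfold pvElem; rw [hnil]
        by_cases hjm : j' < m
        · have hmax1 : max m (j'+1) = m := by omega
          have hmax2 : max (m+1) (j'+1) = m+1 := by omega
          have hinv' := hinv j' hj'
          rw [hmax2] at hinv'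
          rw [hmax1, pvDlist_step lu l1 j' m (by omega), helem, List.append_nil, hinv']
        · have hinv' := hinv j' hj'
          rw [Nat.max_eq_right (by omega)] at hinv'
          rw [hinv', Nat.max_eq_right (by omega)]

lemma pvDlist_filter (lu l1 : List (List String)) (m : Nat) : ∀ lo, m + 1 ≤ lo →
    pvDlist lu l1 m lo = (pvDlist lu l1 (m+1) lo).filter (fun r => pvCond lu r m) := by
  have key : ∀ (k lo : Nat), lu.length ≤ lo + k → m + 1 ≤ lo →
      pvDlist lu l1 m lo = (pvDlist lu l1 (m+1) lo).filter (fun r => pvCond lu r m) := by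
    intro k
    induction k with
    | zero =>
      intro lo hk hlo
      rw [pvDlist_stop lu l1 m lo (by omega), pvDlist_stop lu l1 (m+1) lo (by omega)]
      rfl
    | succ k ih =>
      intro lo hk hlo
      by_cases hlt : lo < lu.length
      · rw [pvDlist_step lu l1 m lo hlt, pvDlist_step lu l1 (m+1) lo hlt,
            List.filter_append, ih (lo+1) (by omega) (by omega)]
        congr 1
        unfold pvElem
        cases l1.getD lo [] with
        | nil => rfl
        | cons r rest =>
          show (if pvAll lu r m lo = true then [r] else []) =
            List.filter (fun r => pvCond lu r m) (if pvAll lu r (m+1) lo = true then [r] else [])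
          rw [pvAll_cons_left lu r m lo hlo]
          by_cases hall : pvAll lu r (m+1) lo = true
          · rw [hall]
            by_cases hc : pvCond lu r m = true
            · simp [hc]
            · have : pvCond lu r m = false := Bool.eq_false_iff.mpr hc
              simp [this]
          · have : pvAll lu r (m+1) lo = false := Bool.eq_false_iff.mpr hall
            simp [this]
      · rw [pvDlist_stop lu l1 m lo (by omega), pvDlist_stop lu l1 (m+1) lo (by omega)]
        rfl
  exact fun lo hlo => key lu.length lo (by omega) hlo

lemma sweepB_length (lu l1 : List (List String)) : ∀ (t : Nat) (l2 : List (List String)) (S : List String),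
    (sweepB lu l1 l2 S t).length = l2.length := by
  intro t
  induction t with
  | zero => intro l2 S; rfl
  | succ t ih =>
    intro l2 S
    simp only [sweepB]
    rw [ih]
    simp

lemma sweepB_getD (lu l1 : List (List String)) (hshape : ∀ i, l1.getD i [] = [] ∨ ∃ r, l1.getD i [] = [r]) :
    ∀ (m : Nat) (l2 : List (List String)), m ≤ lu.length → l2.length = lu.length →
    (∀ j, j < lu.length → m ≤ j → l2.getD j [] = (pvDlist lu l1 j (j+1)).foldl pvDed (l1.getD j [])) →
    (∀ j, j < m → l2.getD j [] = l1.getD j []) →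
    ∀ j, j < lu.length → (sweepB lu l1 l2 (pvDlist lu l1 m m) m).getD j [] =
      (pvDlist lu l1 j (j+1)).foldl pvDed (l1.getD j []) := by
  intro m
  induction m with
  | zero =>
    intro l2 hm hl hfin hlow j hj
    exact hfin j hj (Nat.zero_le j)
  | succ m ih =>
    intro l2 hm hl hfin hlow j hj
    simp only [sweepB]
    have hmn : m < lu.length := by omega
    have hS1 : (if pvCalls.contains ((lu.getD m []).getD 0 "") = true then []
        else (pvDlist lu l1 (m+1) (m+1)).filter
          (fun r => !(PySem.Str.isIn r (PySem.Str.join " " (lu.getD m []))))) =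
        pvDlist lu l1 m (m+1) := by
      rw [pvDlist_filter lu l1 m (m+1) le_rfl]
      by_cases hcall : pvCalls.contains ((lu.getD m []).getD 0 "") = true
      · rw [if_pos hcall]
        have hfalse : ∀ r, pvCond lu r m = false := by
          intro r; unfold pvCond; rw [hcall]; simp
        symm
        simp [hfalse]
      · rw [if_neg hcall]
        apply List.filter_congr
        intro r _
        unfold pvCond
        rw [Bool.eq_false_iff.mpr hcall]
        simp
    rw [hS1]
    have hSnew : pvDlist lu l1 m (m+1) ++ l1.getD m [] = pvDlist lu l1 m m := by
      rw [pvDlist_step lu l1 m m hmn]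
      congr 1
      rcases hshape m with hn | ⟨r, hr⟩
      · unfold pvElem; rw [hn]
      · unfold pvElem; rw [hr]
        simp [pvAll_of_le lu r m m le_rfl]
    rw [hSnew]
    have hded : (fun (acc : List String) (r : String) => if acc.contains r then acc else acc ++ [r]) = pvDed := rfl
    rw [hded]
    refine ih _ (by omega) (by simp [hl]) ?_ ?_ j hj
    · intro j' hj' hmj'
      by_cases hjm : j' = m
      · subst hjm
        have hlt : j' < l2.length := by omega
        simp only [List.getD, List.getElem?_set_self hlt, Option.getD_some]
        have h := hlow j' (by omega)
        simp only [List.getD] at h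
        rw [h]
      · have hne : m ≠ j' := fun h => hjm h.symm
        simp only [List.getD, List.getElem?_set_ne hne]
        exact hfin j' hj' (by omega)
    · intro j' hj'
      have hne : m ≠ j' := by omega
      simp only [List.getD, List.getElem?_set_ne hne]
      exact hlow j' (by omega)

-- phase-3 fold of A builds a pair of maps
lemma foldl_pair_append {α β γ : Type} (g : α → β) (h : α → γ) :
    ∀ (l : List α) (a : List β) (b : List γ),
    l.foldl (fun (p : List β × List γ) x => (p.1 ++ [g x], p.2 ++ [h x])) (a, b) = (a ++ l.map g, b ++ l.map h) := by
  intro l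
  induction l with
  | nil => intro a b; simp
  | cons x xs ih =>
    intro a b
    simp only [List.foldl_cons, List.map_cons, ih]
    simp

lemma map_getD_range {α : Type} (xs : List α) (d : α) : (List.range xs.length).map (fun i => xs.getD i d) = xs := by
  apply List.ext_getElem
  · simp
  · intro i h1 h2
    simp [List.getD_eq_getElem?_getD, List.getElem?_eq_getElem h2]

-- ===== VERDICT (by name: the statement is the Claim_ definition above) =====
theorem syn2_spec : Claim_equal_syn2 := by
  intro lu _ _
  unfold Spec_syn2
  show syn2 lu = syn2_alt lu
  simp only [syn2, syn2_alt, List.nil_append]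
  rw [PySem.List.foldl_append_singleton_eq_map, List.nil_append]
  set f : List String → List String := fun line =>
    if (decide (1 < line.length) && pvSC.contains (line.getD 0 "")
        && !(PySem.Str.isIn (line.getD 1 "") (PySem.Str.join " " (line.drop 2)))
        && !(pvRX.contains (line.getD 1 ""))) then [line.getD 1 ""] else [] with hf
  set l1 : List (List String) := lu.map f with hl1
  have hlen1 : l1.length = lu.length := by rw [hl1, List.length_map]
  have hshape : ∀ i, l1.getD i [] = [] ∨ ∃ r, l1.getD i [] = [r] := by
    intro i
    by_cases h : i < l1.length
    · have hmem : l1.getD i [] ∈ l1 := by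
        rw [List.getD_eq_getElem l1 [] h]; exact List.getElem_mem h
      rw [hl1] at hmem
      obtain ⟨a, _, ha⟩ := List.mem_map.mp hmem
      rw [← ha, hf]
      by_cases hc : (decide (1 < a.length) && pvSC.contains (a.getD 0 "")
          && !(PySem.Str.isIn (a.getD 1 "") (PySem.Str.join " " (a.drop 2)))
          && !(pvRX.contains (a.getD 1 ""))) = true
      · right; exact ⟨a.getD 1 "", by show (if _ then [a.getD 1 ""] else []) = _; rw [if_pos hc]⟩
      · left; show (if _ then [a.getD 1 ""] else []) = ([] : List String); rw [if_neg hc]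
    · left; exact List.getD_eq_default l1 [] (by omega)
  have hA : ∀ j, j < lu.length → (outerA lu l1 l1 l1.length).getD j [] =
      (pvDlist lu l1 j (j+1)).foldl pvDed (l1.getD j []) := by
    rw [hlen1]
    refine outerA_getD lu l1 lu.length l1 le_rfl hlen1 ?_
    intro j hj
    rw [pvDlist_stop lu l1 j (max lu.length (j+1)) (by omega)]
    rfl
  have hB : ∀ j, j < lu.length → (sweepB lu l1 (l1.map (fun x => x)) [] lu.length).getD j [] =
      (pvDlist lu l1 j (j+1)).foldl pvDed (l1.getD j []) := by
    rw [List.map_id' l1]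
    have h0 : ([] : List String) = pvDlist lu l1 lu.length lu.length :=
      (pvDlist_stop lu l1 lu.length lu.length le_rfl).symm
    have hs := sweepB_getD lu l1 hshape lu.length l1 le_rfl hlen1
      (fun j hj hle => absurd hj (by omega)) (fun j hj => rfl)
    rw [← h0] at hs
    exact hs
  have hAB : outerA lu l1 l1 l1.length = sweepB lu l1 (l1.map (fun x => x)) [] lu.length := by
    apply List.ext_getElem
    · simp [outerA_length, sweepB_length]
    · intro i h1 h2
      have hi : i < lu.length := by rw [outerA_length] at h1; omega
      rw [← List.getD_eq_getElem _ [] h1, ← List.getD_eq_getElem _ [] h2, hA i hi, hB i hi]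
  rw [hAB]
  set l2 : List (List String) := sweepB lu l1 (l1.map (fun x => x)) [] lu.length
  rw [foldl_pair_append (fun i => lu.getD i [])
    (fun i => if ((l2.getD i []).length != 0) = true then
        (let s := PySem.List.sorted (l2.getD i []) (fun x => x) false
         if (decide (i ≠ 0) && !(pvCalls.contains ((lu.getD (i-1) []).getD 0 ""))) || decide (i = 0) then s else [])
      else []) (List.range l1.length) [] []]
  simp only [List.nil_append, Prod.mk.injEq]
  constructor
  · rw [hlen1, map_getD_range lu [], List.map_id' lu]
  · rw [hlen1]
    apply List.map_eq_map_iff.mpr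
    intro i hi
    by_cases h1 : l2[i]?.getD [] = [] <;>
      by_cases h2 : (lu[i-1]?.getD [])[0]?.getD "" ∈ pvCalls <;>
      by_cases h3 : i = 0 <;>
      simp [List.getD, h1, h2, h3]
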